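-- pv_equiv track=rewrite | github.com/aria1th/Torus-Hamilton-Decomposition | RoundY/d5_color0_formula_and_even_obstruction_check.py | generic_region_check
-- ===== SOURCE A (Python) =====
-- import itertools, json
--
-- def d1_formula(q, w, v, u, m):
--     if q == 2 and w == 0 and (q + v + u) % m == 0:
--         return 3
--     if q == 2:
--         return 4
--     if u == 1:
--         return 2
--     return 0
--
-- def d2_formula(q, w, v, u, m):
--     if q == 0 and u == 4:
--         return 2 if (w + v) % m == (m - 4) % m else 3
--     if q != 2 and u == 2:
--         return 1
--     if q != 2 and u == 0 and v == 4:
--         return 1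
--     if q == 2 and w == 0 and (v + u) % m == (m - 2) % m:
--         return 1 if u == 2 else 0
--     if q == 2 and u == 1:
--         return 1
--     if q == 2 and u == (m - 1) % m and v == 4:
--         return 1
--     return 0
--
-- def d3_formula(q, w, v, u, m):
--     d1 = d1_formula(q, w, v, u, m)
--     d2 = d2_formula(q, w, v, u, m)
--     s = (q + w + v + u) % m
--     x0_before_layer3 = (-s + 1 + (1 if d1 == 0 else 0) + (1 if d2 == 0 else 0)) % m
--     x2_before_layer3 = (w + (1 if d1 == 2 else 0) + (1 if d2 == 2 else 0)) % m
--     if x0_before_layer3 == 4: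
--         return 2
--     if x2_before_layer3 == 2:
--         return 1
--     return 3
--
-- def generic_region_check(m):
--     count = 0
--     for q, w, v, u in itertools.product(range(m), repeat=4):
--         if q in {0, 2}:
--             continue
--         if u in {0, 1, 2, 4, (m - 1) % m}:
--             continue
--         assert d1_formula(q, w, v, u, m) == 0
--         assert d2_formula(q, w, v, u, m) == 0
--         d3 = d3_formula(q, w, v, u, m)
--         s = (q + w + v + u) % m
--         if s == (m - 1) % m:
--             assert d3 == 2
--         elif w == 2:
--             assert d3 == 1
--         else:
--             assert d3 == 3
--         count += 1
--     return count
-- ===== SOURCE B (Python) =====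
-- def generic_region_check(m):
--     # Closed form: the asserts in A never fire, so the count is just
--     # (#q in range(m) outside {0,2}) * m * m * (#u in range(m) outside {0,1,2,4,m-1}).
--     if m <= 4:
--         return 0
--     valid_q = m - 2
--     valid_u = 1 if m == 5 else m - 5
--     return valid_q * m * m * valid_u
-- ===== Notes on version B (the rewrite author's own statement) =====
-- stated objective: faster
-- what changed: Replaced the quadruple nested loop with filters and never-firing asserts by a closed-form product (m-2)*m*m*(m-5, or 1 when m=5), proved equal for every m.
import Mathlib
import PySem

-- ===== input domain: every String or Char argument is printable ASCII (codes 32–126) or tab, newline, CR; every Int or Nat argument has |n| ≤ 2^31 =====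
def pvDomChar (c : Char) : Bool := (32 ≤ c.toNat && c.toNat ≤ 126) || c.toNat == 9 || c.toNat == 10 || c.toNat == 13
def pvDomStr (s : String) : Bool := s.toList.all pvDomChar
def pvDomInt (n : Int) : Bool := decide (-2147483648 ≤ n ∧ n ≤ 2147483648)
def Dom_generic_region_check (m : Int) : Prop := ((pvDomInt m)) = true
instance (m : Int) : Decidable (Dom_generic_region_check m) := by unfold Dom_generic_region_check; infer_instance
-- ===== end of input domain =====

-- B replaces A's O(m^4) filtered enumeration (whose asserts are proved never to fire) by a closed-form product; objective: faster.

-- ===== PORT A =====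
def d1_formula (q w v u m : Int) : Int :=
  if q = 2 ∧ w = 0 ∧ PySem.Int.mod (q + v + u) m = 0 then 3
  else if q = 2 then 4
  else if u = 1 then 2
  else 0

def d2_formula (q w v u m : Int) : Int :=
  if q = 0 ∧ u = 4 then (if PySem.Int.mod (w + v) m = PySem.Int.mod (m - 4) m then 2 else 3)
  else if q ≠ 2 ∧ u = 2 then 1
  else if q ≠ 2 ∧ u = 0 ∧ v = 4 then 1
  else if q = 2 ∧ w = 0 ∧ PySem.Int.mod (v + u) m = PySem.Int.mod (m - 2) m then (if u = 2 then 1 else 0)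
  else if q = 2 ∧ u = 1 then 1
  else if q = 2 ∧ u = PySem.Int.mod (m - 1) m ∧ v = 4 then 1
  else 0

def d3_formula (q w v u m : Int) : Int :=
  let d1 := d1_formula q w v u m
  let d2 := d2_formula q w v u m
  let s := PySem.Int.mod (q + w + v + u) m
  let x0_before_layer3 := PySem.Int.mod (-s + 1 + (if d1 = 0 then 1 else 0) + (if d2 = 0 then 1 else 0)) m
  let x2_before_layer3 := PySem.Int.mod (w + (if d1 = 2 then 1 else 0) + (if d2 = 2 then 1 else 0)) m
  if x0_before_layer3 = 4 then 2
  else if x2_before_layer3 = 2 then 1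
  else 3

-- one tuple of the product loop; a failing `assert` is modeled as `none` (AssertionError)
def grcStepU (m q w v : Int) (st : Option Int) (u : Int) : Option Int :=
  match st with
  | none => none
  | some count =>
    if q = 0 ∨ q = 2 then some count
    else if u = 0 ∨ u = 1 ∨ u = 2 ∨ u = 4 ∨ u = PySem.Int.mod (m - 1) m then some count
    else if d1_formula q w v u m ≠ 0 then none
    else if d2_formula q w v u m ≠ 0 then none
    else
      let d3 := d3_formula q w v u m
      let s := PySem.Int.mod (q + w + v + u) m
      if s = PySem.Int.mod (m - 1) m then (if d3 ≠ 2 then none else some (count + 1))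
      else if w = 2 then (if d3 ≠ 1 then none else some (count + 1))
      else (if d3 ≠ 3 then none else some (count + 1))

def grcStepV (m q w : Int) (st : Option Int) (v : Int) : Option Int :=
  (PySem.List.pyRange 0 m 1).foldl (grcStepU m q w v) st

def grcStepW (m q : Int) (st : Option Int) (w : Int) : Option Int :=
  (PySem.List.pyRange 0 m 1).foldl (grcStepV m q w) st

def grcStepQ (m : Int) (st : Option Int) (q : Int) : Option Int :=
  (PySem.List.pyRange 0 m 1).foldl (grcStepW m q) st

def generic_region_check (m : Int) : Int :=
  -- itertools.product(range(m), repeat=4) = four nested folds; `.getD 0` is the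
  -- AssertionError case, which never occurs (proved below)
  (((PySem.List.pyRange 0 m 1).foldl (grcStepQ m) (some 0)).getD 0)

-- ===== PORT B =====
def generic_region_check_alt (m : Int) : Int :=
  if m ≤ 4 then 0
  else
    let valid_q := m - 2
    let valid_u := if m = 5 then 1 else m - 5
    valid_q * m * m * valid_u

-- ===== PRECONDITION & SPEC =====
def Spec_generic_region_check (m : Int) (out : Int) : Prop := out = generic_region_check_alt m
instance (m : Int) (out : Int) : Decidable (Spec_generic_region_check m out) := by unfold Spec_generic_region_check; infer_instance

-- ===== CLAIM (what is proved, stated in full; the proofs are below) =====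
def Claim_equal_generic_region_check : Prop := ∀ (m : Int), Dom_generic_region_check m → Spec_generic_region_check m (generic_region_check m)

-- ===== LEMMAS AND PROOFS =====

def pU (m : Int) : Int → Bool := fun u => !(u = 0 || u = 1 || u = 2 || u = 4 || u = m - 1)
def pQ : Int → Bool := fun q => !(q = 0 || q = 2)
def Ucnt (m : Int) : Int := (((PySem.List.pyRange 0 m 1).countP (pU m)) : Int)

lemma mod_m1 (m : Int) (hm : 1 ≤ m) : PySem.Int.mod (m - 1) m = m - 1 := by
  rw [PySem.Int.mod_eq_emod_of_pos (by omega)]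
  exact Int.emod_eq_of_lt (by omega) (by omega)

lemma stepU_valid (m q w v u c : Int) (hm : 5 ≤ m)
    (hqa : q ≠ 0) (hqb : q ≠ 2)
    (hw0 : 0 ≤ w) (hw1 : w < m)
    (hu0 : 0 ≤ u) (hu1 : u < m)
    (hua : u ≠ 0) (hub : u ≠ 1) (huc : u ≠ 2) (hud : u ≠ 4) (hue : u ≠ m - 1) :
    grcStepU m q w v (some c) u = some (c + 1) := by
  have hmp : (0:Int) < m := by omega
  have hmod1 : PySem.Int.mod (m - 1) m = m - 1 := mod_m1 m (by omega)
  have hd1 : d1_formula q w v u m = 0 := by simp [d1_formula, hqb, hub]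
  have hd2 : d2_formula q w v u m = 0 := by simp [d2_formula, hqa, hqb, hua, huc]
  set s := PySem.Int.mod (q + w + v + u) m with hs
  have hs0 : 0 ≤ s := PySem.Int.mod_nonneg _ hmp
  have hs1 : s < m := PySem.Int.mod_lt _ hmp
  have hx0 : PySem.Int.mod (-s + 1 + 1 + 1) m
      = if s = m - 1 then 4 else (if s ≤ 3 then 3 - s else 3 - s + m) := by
    rw [PySem.Int.mod_eq_emod_of_pos hmp]
    by_cases h1 : s = m - 1
    · rw [if_pos h1, h1]
      have e : -(m - 1) + 1 + 1 + 1 = 4 + m * (-1) := by ring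
      rw [e, Int.add_mul_emod_self_left]
      exact Int.emod_eq_of_lt (by omega) (by omega)
    · rw [if_neg h1]
      by_cases h2 : s ≤ 3
      · rw [if_pos h2]
        have e : -s + 1 + 1 + 1 = 3 - s := by ring
        rw [e]; exact Int.emod_eq_of_lt (by omega) (by omega)
      · rw [if_neg h2]
        have e : -s + 1 + 1 + 1 = (3 - s + m) + m * (-1) := by ring
        rw [e, Int.add_mul_emod_self_left]
        exact Int.emod_eq_of_lt (by omega) (by omega)
  have hx2 : PySem.Int.mod (w + 0 + 0) m = w := by
    rw [PySem.Int.mod_eq_emod_of_pos hmp]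
    have e : w + 0 + 0 = w := by ring
    rw [e]; exact Int.emod_eq_of_lt hw0 hw1
  have hd3 : d3_formula q w v u m = if s = m - 1 then 2 else if w = 2 then 1 else 3 := by
    unfold d3_formula
    rw [hd1, hd2]
    simp only [if_true, if_neg (by norm_num : ¬ ((0:Int) = 2))]
    rw [← hs, hx0, hx2]
    by_cases h1 : s = m - 1
    · simp [h1]
    · rw [if_neg h1, if_neg h1]
      have : ¬ ((if s ≤ 3 then 3 - s else 3 - s + m) = 4) := by
        by_cases h2 : s ≤ 3
        · rw [if_pos h2]; omega
        · rw [if_neg h2]; omega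
      rw [if_neg this]
  have hnu : ¬ (u = 0 ∨ u = 1 ∨ u = 2 ∨ u = 4 ∨ u = PySem.Int.mod (m - 1) m) := by
    rw [hmod1]; simp [hua, hub, huc, hud, hue]
  have hnq : ¬ (q = 0 ∨ q = 2) := by simp [hqa, hqb]
  simp only [grcStepU, if_neg hnq, hd1, hd2, hd3, hmod1, ← hs]
  by_cases h1 : s = m - 1
  · simp [h1]
    omega
  · by_cases hw : w = 2 <;> simp [h1, hw] <;> omega

lemma stepU_skip_u (m q w v u c : Int)
    (hu : u = 0 ∨ u = 1 ∨ u = 2 ∨ u = 4 ∨ u = PySem.Int.mod (m - 1) m) :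
    grcStepU m q w v (some c) u = some c := by
  by_cases hq : q = 0 ∨ q = 2
  · simp [grcStepU, hq]
  · simp [grcStepU, hq, hu]

lemma stepU_skip_q (m q w v u c : Int) (hq : q = 0 ∨ q = 2) :
    grcStepU m q w v (some c) u = some c := by
  simp [grcStepU, hq]

lemma uloop_skip (m q w v : Int) (hq : q = 0 ∨ q = 2) (L : List Int) (c : Int) :
    L.foldl (grcStepU m q w v) (some c) = some c := by
  induction L generalizing c with
  | nil => rfl
  | cons x L ih => simp only [List.foldl_cons, stepU_skip_q m q w v x c hq]; exact ih c

lemma vloop_skip (m q w : Int) (hq : q = 0 ∨ q = 2) (L : List Int) (c : Int) :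
    L.foldl (grcStepV m q w) (some c) = some c := by
  induction L generalizing c with
  | nil => rfl
  | cons x L ih =>
    simp only [List.foldl_cons, grcStepV, uloop_skip m q w x hq]; exact ih c

lemma wloop_skip (m q : Int) (hq : q = 0 ∨ q = 2) (L : List Int) (c : Int) :
    L.foldl (grcStepW m q) (some c) = some c := by
  induction L generalizing c with
  | nil => rfl
  | cons x L ih =>
    simp only [List.foldl_cons, grcStepW, vloop_skip m q x hq]; exact ih c

lemma mem_rng (m x : Int) (hx : x ∈ PySem.List.pyRange 0 m 1) : 0 ≤ x ∧ x < m := by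
  have := (PySem.List.mem_pyRange_one (a := 0) (b := m) (x := x)).1 hx
  omega

lemma uloop_valid (m q w v : Int) (hm : 5 ≤ m)
    (hqa : q ≠ 0) (hqb : q ≠ 2) (hw0 : 0 ≤ w) (hw1 : w < m)
    (L : List Int) (hL : ∀ x ∈ L, 0 ≤ x ∧ x < m) (c : Int) :
    L.foldl (grcStepU m q w v) (some c) = some (c + (L.countP (pU m) : Int)) := by
  induction L generalizing c with
  | nil => simp
  | cons x L ih =>
    have hx := hL x (by simp)
    have hL' : ∀ y ∈ L, 0 ≤ y ∧ y < m := fun y hy => hL y (by simp [hy])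
    by_cases hp : pU m x = true
    · have hx1 : grcStepU m q w v (some c) x = some (c + 1) := by
        simp only [pU, Bool.not_eq_true', Bool.or_eq_false_iff, decide_eq_false_iff_not] at hp
        exact stepU_valid m q w v x c hm hqa hqb hw0 hw1 hx.1 hx.2
          hp.1.1.1.1 hp.1.1.1.2 hp.1.1.2 hp.1.2 hp.2
      rw [List.foldl_cons, hx1, ih hL' (c + 1), List.countP_cons_of_pos (l := L) hp]
      congr 1
      push_cast
      ring
    · have hx1 : grcStepU m q w v (some c) x = some c := by
        apply stepU_skip_u
        rw [mod_m1 m (by omega)]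
        simp only [pU, Bool.not_eq_true, Bool.not_eq_eq_eq_not, Bool.not_true,
          Bool.or_eq_false_iff] at hp
        by_contra hcon
        push_neg at hcon
        simp [hcon.1, hcon.2.1, hcon.2.2.1, hcon.2.2.2.1, hcon.2.2.2.2] at hp
      rw [List.foldl_cons, hx1, ih hL' c,
        List.countP_cons_of_neg (l := L) (by simp [hp])]

lemma vloop_valid (m q w : Int) (hm : 5 ≤ m)
    (hqa : q ≠ 0) (hqb : q ≠ 2) (hw0 : 0 ≤ w) (hw1 : w < m)
    (L : List Int) (c : Int) :
    L.foldl (grcStepV m q w) (some c) = some (c + (L.length : Int) * Ucnt m) := by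
  induction L generalizing c with
  | nil => simp
  | cons x L ih =>
    rw [List.foldl_cons]
    have hb : grcStepV m q w (some c) x = some (c + Ucnt m) := by
      unfold grcStepV
      rw [uloop_valid m q w x hm hqa hqb hw0 hw1 _ (mem_rng m) c]
      simp [Ucnt]
    rw [hb, ih (c + Ucnt m)]
    congr 1
    simp only [List.length_cons]
    push_cast
    ring

lemma wloop_valid (m q : Int) (hm : 5 ≤ m) (hqa : q ≠ 0) (hqb : q ≠ 2)
    (L : List Int) (hL : ∀ x ∈ L, 0 ≤ x ∧ x < m) (c : Int) :
    L.foldl (grcStepW m q) (some c) = some (c + (L.length : Int) * (m * Ucnt m)) := by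
  induction L generalizing c with
  | nil => simp
  | cons x L ih =>
    have hx := hL x (by simp)
    have hL' : ∀ y ∈ L, 0 ≤ y ∧ y < m := fun y hy => hL y (by simp [hy])
    rw [List.foldl_cons]
    have hb : grcStepW m q (some c) x = some (c + m * Ucnt m) := by
      unfold grcStepW
      rw [vloop_valid m q x hm hqa hqb hx.1 hx.2 _ c]
      have : ((PySem.List.pyRange 0 m 1).length : Int) = m := by
        rw [PySem.List.length_pyRange_one]; omega
      rw [this]
    rw [hb, ih hL' (c + m * Ucnt m)]
    congr 1
    simp only [List.length_cons]
    push_cast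
    ring

lemma qloop (m : Int) (hm : 5 ≤ m) (L : List Int) (hL : ∀ x ∈ L, 0 ≤ x ∧ x < m) (c : Int) :
    L.foldl (grcStepQ m) (some c) = some (c + (L.countP pQ : Int) * (m * (m * Ucnt m))) := by
  induction L generalizing c with
  | nil => simp
  | cons x L ih =>
    have hx := hL x (by simp)
    have hL' : ∀ y ∈ L, 0 ≤ y ∧ y < m := fun y hy => hL y (by simp [hy])
    rw [List.foldl_cons]
    by_cases hx0 : x = 0 ∨ x = 2
    · have hb : grcStepQ m (some c) x = some c := by
        unfold grcStepQ
        exact wloop_skip m x hx0 _ c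
      have hp : ¬ (pQ x = true) := by rcases hx0 with h | h <;> simp [pQ, h]
      rw [hb, ih hL' c, List.countP_cons_of_neg (l := L) hp]
    · have hxne : x ≠ 0 ∧ x ≠ 2 := by tauto
      have hp : pQ x = true := by simp [pQ, hxne.1, hxne.2]
      have hb : grcStepQ m (some c) x = some (c + m * (m * Ucnt m)) := by
        unfold grcStepQ
        rw [wloop_valid m x hm hxne.1 hxne.2 _ (mem_rng m) c]
        have : ((PySem.List.pyRange 0 m 1).length : Int) = m := by
          rw [PySem.List.length_pyRange_one]; omega
        rw [this]
      rw [hb, ih hL' _, List.countP_cons_of_pos (l := L) hp]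
      congr 1
      push_cast
      ring

lemma countP_pU4 (n : Nat) (hn : 5 ≤ n) :
    (PySem.List.pyRange 0 (n : Int) 1).countP (fun u => !(u = 0 || u = 1 || u = 2 || u = 4)) = n - 4 := by
  induction n with
  | zero => omega
  | succ k ih =>
    by_cases hk : 5 ≤ k
    · have hcast : ((k + 1 : Nat) : Int) = (k : Int) + 1 := by push_cast; ring
      rw [hcast, PySem.List.pyRange_one_succ_right (by positivity), List.countP_append, ih hk]
      have hp : (fun u : Int => !(u = 0 || u = 1 || u = 2 || u = 4)) (k : Int) = true := by
        simp only [Bool.not_eq_true', Bool.or_eq_false_iff, decide_eq_false_iff_not]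
        refine ⟨⟨⟨?_, ?_⟩, ?_⟩, ?_⟩ <;> omega
      simp only [List.countP_singleton, hp, if_pos]
      omega
    · have hk4 : k = 4 := by omega
      subst hk4
      decide

lemma Ucnt_eq (n : Nat) (hn : 5 ≤ n) :
    Ucnt (n : Int) = if (n : Int) = 5 then 1 else (n : Int) - 5 := by
  by_cases h5 : n = 5
  · subst h5; decide
  · have hn6 : 6 ≤ n := by omega
    rw [if_neg (by exact_mod_cast h5)]
    obtain ⟨k, rfl⟩ : ∃ k, n = k + 1 := ⟨n - 1, by omega⟩
    have hk : 5 ≤ k := by omega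
    unfold Ucnt
    have hcast : ((k + 1 : Nat) : Int) = (k : Int) + 1 := by push_cast; ring
    rw [hcast, PySem.List.pyRange_one_succ_right (by positivity), List.countP_append]
    have hpk : pU ((k:Int)+1) (k:Int) = false := by
      simp only [pU, Bool.not_eq_eq_eq_not, Bool.not_false, Bool.or_eq_true_iff, decide_eq_true_eq]
      omega
    have hlast : List.countP (pU ((k:Int)+1)) [(k : Int)] = 0 := by
      simp [List.countP_singleton, hpk]
    have hpre : List.countP (pU ((k:Int)+1)) (PySem.List.pyRange 0 (k:Int) 1)
        = List.countP (fun u : Int => !(u = 0 || u = 1 || u = 2 || u = 4)) (PySem.List.pyRange 0 (k:Int) 1) := by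
      apply List.countP_congr
      intro x hx
      have hb := (PySem.List.mem_pyRange_one (a := 0) (b := (k:Int)) (x := x)).1 hx
      have hne : decide (x = (k:Int) + 1 - 1) = false := by
        simp only [decide_eq_false_iff_not]
        omega
      simp [pU, hne]
      intros
      omega
    rw [hlast, hpre, countP_pU4 k hk]
    push_cast
    omega

lemma countP_pQ (n : Nat) (hn : 3 ≤ n) :
    ((PySem.List.pyRange 0 (n : Int) 1).countP pQ : Int) = (n : Int) - 2 := by
  induction n with
  | zero => omega
  | succ k ih =>
    by_cases hk : 3 ≤ k
    · have hcast : ((k + 1 : Nat) : Int) = (k : Int) + 1 := by push_cast; ring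
      rw [hcast, PySem.List.pyRange_one_succ_right (by positivity), List.countP_append, Nat.cast_add, ih hk]
      have hpk : pQ (k : Int) = true := by
        simp only [pQ, Bool.not_eq_true', Bool.or_eq_false_iff, decide_eq_false_iff_not]
        constructor <;> omega
      have hp : List.countP pQ [(k : Int)] = 1 := by
        simp [List.countP_singleton, hpk]
      rw [hp]
      push_cast
      ring
    · have hk2 : k = 2 := by omega
      subst hk2
      decide

-- ===== VERDICT (by name: the statement is the Claim_ definition above) =====
set_option maxRecDepth 40000 in
theorem generic_region_check_spec : Claim_equal_generic_region_check := by
  intro m _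
  unfold Spec_generic_region_check
  by_cases hm : m ≤ 0
  · unfold generic_region_check generic_region_check_alt
    rw [PySem.List.pyRange_one_eq_nil (by omega)]
    simp
    omega
  · by_cases hm4 : m ≤ 4
    · interval_cases m <;> decide
    · have hm5 : 5 ≤ m := by omega
      obtain ⟨n, rfl⟩ : ∃ n : Nat, m = (n : Int) := ⟨m.toNat, by omega⟩
      have hn5 : 5 ≤ n := by exact_mod_cast hm5
      unfold generic_region_check
      rw [qloop (n : Int) hm5 _ (mem_rng (n : Int)) 0]
      rw [countP_pQ n (by omega), Ucnt_eq n hn5]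
      simp only [Option.getD_some, generic_region_check_alt,
        if_neg (show ¬ ((n:Int) ≤ 4) by omega)]
      by_cases h5 : (n : Int) = 5
      · rw [if_pos h5]
        ring
      · rw [if_neg h5]
        ring
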